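-- pv_equiv track=rewrite | github.com/ruben9830/sql_ai_lab | src/demo_data.py | _dedupe_names
-- ===== SOURCE A (Python) =====
-- def _dedupe_names(names: list[str]) -> list[str]:
--     seen: dict[str, int] = {}
--     out: list[str] = []
--     for name in names:
--         count = seen.get(name, 0)
--         if count == 0:
--             out.append(name)
--         else:
--             out.append(f"{name}_{count + 1}")
--         seen[name] = count + 1
--     return out
-- ===== SOURCE B (Python) =====
-- def _dedupe_names(names: list[str]) -> list[str]:
--     # Group-and-scatter: first group the positions of each name, then write the
--     # labels for each name's occurrence list directly into a preallocated output.
--     positions: dict[str, list[int]] = {}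
--     for i, name in enumerate(names):
--         positions.setdefault(name, []).append(i)
--     out = [None] * len(names)
--     for name, idxs in positions.items():
--         for k, i in enumerate(idxs):
--             out[i] = name if k == 0 else f"{name}_{k + 1}"
--     return out
-- ===== Notes on version B (the rewrite author's own statement) =====
-- stated objective: alternative
-- what changed: Replaced the single online pass with a running-count dict by a two-stage group-and-scatter: first build a dict mapping each name to the list of its positions, then write each name's labelled occurrences into a preallocated output array by index.
import Mathlib
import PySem

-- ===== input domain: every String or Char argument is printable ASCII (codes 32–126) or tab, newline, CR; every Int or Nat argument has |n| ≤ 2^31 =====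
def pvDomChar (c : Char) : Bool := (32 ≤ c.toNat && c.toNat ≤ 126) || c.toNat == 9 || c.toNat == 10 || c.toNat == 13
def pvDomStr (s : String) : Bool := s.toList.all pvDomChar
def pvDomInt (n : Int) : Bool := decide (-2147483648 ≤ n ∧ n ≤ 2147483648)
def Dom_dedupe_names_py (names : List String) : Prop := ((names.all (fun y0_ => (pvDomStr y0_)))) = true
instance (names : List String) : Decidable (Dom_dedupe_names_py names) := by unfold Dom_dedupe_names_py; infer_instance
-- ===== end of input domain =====

-- B replaces A's single online pass (dict of running counts, appending labels as it goes) by a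
-- two-stage group-and-scatter: group the positions of each name, then write each name's labelled
-- occurrences into a preallocated output by index (objective: alternative).

-- ===== PORT A =====
def dedupe_names_py (names : List String) : List String :=
  (names.foldl
    (fun (st : PySem.Dict String Int × List String) name =>
      let count := st.1.getD name 0
      let out := if count = 0 then st.2 ++ [name]
                 else st.2 ++ [name ++ "_" ++ PySem.Int.toStr (count + 1)]
      (st.1.insert name (count + 1), out))
    (PySem.Dict.empty, [])).2

-- ===== PORT B =====
-- `List.replicate names.length ""` is Source B's `out = [None] * len(names)` buffer; every slot is
-- overwritten before the list is returned (proved below), so the placeholder never survives.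
def dedupe_names_py_alt (names : List String) : List String :=
  let positions : PySem.Dict String (List Int) :=
    (PySem.List.enumerate names).foldl
      (fun d p => d.modify p.2 [] (fun l => l ++ [p.1])) PySem.Dict.empty
  positions.items.foldl
    (fun out it =>
      (PySem.List.enumerate it.2).foldl
        (fun out q =>
          PySem.List.pySetD out q.2
            (if q.1 = 0 then it.1 else it.1 ++ "_" ++ PySem.Int.toStr (q.1 + 1)))
        out)
    (List.replicate names.length "")

-- ===== PRECONDITION & SPEC =====
def Spec_dedupe_names_py (names : List String) (out : List String) : Prop := out = dedupe_names_py_alt names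
instance (names : List String) (out : List String) : Decidable (Spec_dedupe_names_py names out) := by unfold Spec_dedupe_names_py; infer_instance

-- ===== CLAIM (what is proved, stated in full; the proofs are below) =====
def Claim_equal_dedupe_names_py : Prop := ∀ (names : List String), Dom_dedupe_names_py names → Spec_dedupe_names_py names (dedupe_names_py names)

-- ===== LEMMAS AND PROOFS =====

/-- The label both programs emit for an occurrence whose preceding prefix is `pre`. -/
def pvSuffix (pre : List String) (n : String) : String :=
  if pre.count n = 0 then n else n ++ "_" ++ PySem.Int.toStr ((pre.count n : Int) + 1)

/-- Canonical characterisation: each element is labelled against its preceding prefix. -/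
def pvSpec : List String → List String → List String
  | _, [] => []
  | pre, n :: t => pvSuffix pre n :: pvSpec (pre ++ [n]) t

/-- The label of position `m` of `names`. -/
def pvLbl (names : List String) (m : Nat) : String :=
  pvSuffix (names.take m) (names.getD m "")

/-- The positions of `v` among `rest`, indexed from `s` (B's `positions[v]`). -/
def pvPos (s : Int) (rest : List String) (v : String) : List Int :=
  ((PySem.List.enumerate rest s).filter (fun p => p.2 == v)).map (·.1)

/-- The per-name write list of B's scatter phase. -/
def pvWrites (it : String × List Int) : List (Int × String) :=
  (PySem.List.enumerate it.2).map
    (fun q => (q.2, if q.1 = 0 then it.1 else it.1 ++ "_" ++ PySem.Int.toStr (q.1 + 1)))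

-- ---- A's fold produces pvSpec ----

lemma A_gen (rest : List String) :
    ∀ (pre : List String) (d : PySem.Dict String Int) (acc : List String),
    (∀ v, d.getD v 0 = (pre.count v : Int)) →
    (rest.foldl
      (fun (st : PySem.Dict String Int × List String) name =>
        let count := st.1.getD name 0
        let out := if count = 0 then st.2 ++ [name]
                   else st.2 ++ [name ++ "_" ++ PySem.Int.toStr (count + 1)]
        (st.1.insert name (count + 1), out))
      (d, acc)).2 = acc ++ pvSpec pre rest := by
  induction rest with
  | nil => intro pre d acc _; simp [pvSpec]
  | cons n t ih =>
    intro pre d acc hd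
    simp only [List.foldl_cons]
    rw [ih (pre ++ [n]) _ _ ?_]
    · have hc : d.getD n 0 = (pre.count n : Int) := hd n
      by_cases h : pre.count n = 0
      · simp [pvSpec, pvSuffix, hc, h]
      · have : ¬ ((pre.count n : Int) = 0) := by exact_mod_cast h
        simp [pvSpec, pvSuffix, hc, h]
    · intro v
      rw [PySem.Dict.getD_insert]
      rcases eq_or_ne v n with rfl | hv
      · simp [hd v, List.count_append]
      · simp [hv, hd v, List.count_append, Ne.symm hv]

lemma A_eq_spec (names : List String) : dedupe_names_py names = pvSpec [] names := by
  unfold dedupe_names_py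
  rw [A_gen names [] PySem.Dict.empty [] (by intro v; simp [PySem.Dict.getD_empty]),
    List.nil_append]

-- ---- pvSpec pointwise ----

lemma pvSpec_eq_map (rest : List String) : ∀ (pre : List String),
    pvSpec pre rest = (List.range rest.length).map (fun k => pvLbl (pre ++ rest) (pre.length + k)) := by
  induction rest with
  | nil => intro pre; simp [pvSpec]
  | cons n t ih =>
    intro pre
    rw [pvSpec, List.length_cons, List.range_succ_eq_map, List.map_cons, List.map_map]
    congr 1
    · simp [pvLbl, List.getD]
    · rw [ih (pre ++ [n])]
      apply List.map_congr_left
      intro k _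
      simp only [Function.comp_apply, List.append_assoc, List.singleton_append,
        List.length_append, List.length_singleton]
      congr 1
      omega

-- ---- B's grouping dict ----

lemma getD_positions (names : List String) (v : String) :
    ((PySem.List.enumerate names).foldl
      (fun d p => d.modify p.2 [] (fun l => l ++ [p.1])) PySem.Dict.empty).getD v []
    = pvPos 0 names v := by
  rw [show ((PySem.List.enumerate names).foldl
      (fun d p => d.modify p.2 [] (fun l => l ++ [p.1])) (PySem.Dict.empty : PySem.Dict String (List Int)))
    = (((PySem.List.enumerate names).map Prod.swap).foldl
      (fun d p => d.modify p.1 [] (fun l => l ++ [p.2])) PySem.Dict.empty) from by rw [List.foldl_map]; rfl]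
  rw [PySem.Dict.getD_foldl_modify_append]
  simp [pvPos, PySem.Dict.getD_empty, List.filter_map, List.map_map, Function.comp_def]

lemma positions_items (names : List String) :
    ((PySem.List.enumerate names).foldl
      (fun d p => d.modify p.2 [] (fun l => l ++ [p.1])) PySem.Dict.empty).items
    = (PySem.Set.ofList names).map (fun v => (v, pvPos 0 names v)) := by
  have hkeys : ((PySem.List.enumerate names).foldl
      (fun d p => d.modify p.2 [] (fun l => l ++ [p.1])) (PySem.Dict.empty : PySem.Dict String (List Int))).keys
      = PySem.Set.ofList names := by
    rw [PySem.Dict.keys_foldl_modify_key]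
    simp [PySem.Dict.keys_empty, PySem.List.map_snd_enumerate, PySem.Set.update_nil_left]
  have hnd : ((PySem.List.enumerate names).foldl
      (fun d p => d.modify p.2 [] (fun l => l ++ [p.1])) (PySem.Dict.empty : PySem.Dict String (List Int))).keys.Nodup := by
    rw [hkeys]; exact PySem.Set.nodup_ofList _
  rw [PySem.Dict.items_eq_map_keys _ hnd ([] : List Int), hkeys]
  exact List.map_congr_left (fun v _ => by rw [getD_positions])

/-- Every entry of `enumerate (pvPos …)` names an occurrence with its prior-occurrence count. -/
lemma pos_mem (v : String) (rest : List String) : ∀ (pre : List String),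
    ∀ p ∈ PySem.List.enumerate (pvPos (pre.length : Int) rest v) ((pre.count v : Int)),
    ∃ m : Nat, m < pre.length + rest.length ∧ p.2 = (m : Int) ∧
      (pre ++ rest).getD m "" = v ∧ p.1 = (((pre ++ rest).take m).count v : Int) := by
  induction rest with
  | nil => intro pre p hp; simp [pvPos, PySem.List.enumerate_nil] at hp
  | cons x t ih =>
    intro pre p hp
    rw [pvPos, PySem.List.enumerate_cons, List.filter_cons] at hp
    by_cases hxv : x = v
    · subst hxv
      simp only [beq_self_eq_true, if_pos] at hp
      rw [List.map_cons, PySem.List.enumerate_cons] at hp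
      rcases List.mem_cons.1 hp with h | h
      · subst h
        refine ⟨pre.length, by simp, rfl, ?_, ?_⟩
        · simp [List.getD_eq_getElem?_getD]
        · simp
      · have h2 := ih (pre ++ [x]) p ?_
        · rcases h2 with ⟨m, hm1, hm2, hm3, hm4⟩
          exact ⟨m, by simp at hm1 ⊢; omega, hm2, by simpa using hm3, by simpa using hm4⟩
        · rw [pvPos]
          simpa [List.count_append] using h
    · have hbe : (x == v) = false := by simp [hxv]
      simp only [hbe, if_neg, Bool.false_eq_true, not_false_iff] at hp
      have h2 := ih (pre ++ [x]) p ?_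
      · rcases h2 with ⟨m, hm1, hm2, hm3, hm4⟩
        exact ⟨m, by simp at hm1 ⊢; omega, hm2, by simpa using hm3, by simpa using hm4⟩
      · rw [pvPos]
        simpa [List.count_append, hxv] using hp

lemma pos_cover (names : List String) (m : Nat) (hm : m < names.length) :
    ((m : Nat) : Int) ∈ pvPos 0 names (names.getD m "") := by
  unfold pvPos
  apply List.mem_map.2
  refine ⟨((m : Int), names[m]), ?_, rfl⟩
  apply List.mem_filter.2
  constructor
  · exact (PySem.List.mem_enumerate_iff _ _ _).2 ⟨m, hm, by simp⟩
  · simp [List.getD_eq_getElem?_getD, hm]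

-- ---- the scatter phase ----

lemma scatter_getElem (n : Nat) (f : Nat → String) (ws : List (Int × String))
    (hw : ∀ p ∈ ws, ∃ m : Nat, m < n ∧ p.1 = (m : Int) ∧ p.2 = f m) :
    ∀ (o : List String), o.length = n → ∀ m, m < n →
    ((ws.foldl (fun o q => PySem.List.pySetD o q.1 q.2) o).length = n ∧
     (ws.foldl (fun o q => PySem.List.pySetD o q.1 q.2) o).getD m ""
       = if ((m : Nat) : Int) ∈ ws.map (·.1) then f m else o.getD m "") := by
  induction ws with
  | nil => intro o ho m hm; simp [ho]
  | cons w ws ih =>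
    intro o ho m hm
    rcases hw w List.mem_cons_self with ⟨mw, hmw, hw1, hw2⟩
    simp only [List.foldl_cons]
    have hset : PySem.List.pySetD o w.1 w.2 = o.set mw (f mw) := by
      rw [hw1, hw2, PySem.List.pySetD_natCast]
    rw [hset]
    have hlen : (o.set mw (f mw)).length = n := by simp [ho]
    have ihh := ih (fun p hp => hw p (List.mem_cons_of_mem _ hp)) (o.set mw (f mw)) hlen m hm
    refine ⟨ihh.1, ?_⟩
    rw [ihh.2]
    by_cases hmm : m = mw
    · subst hmm
      simp only [List.map_cons, List.mem_cons, hw1, true_or, if_pos]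
      by_cases hmem : ((m : Nat) : Int) ∈ ws.map (·.1)
      · simp [hmem]
      · simp [hmem, List.getD_eq_getElem?_getD, ho, hm]
    · have hcast : ¬ ((m : Nat) : Int) = w.1 := by rw [hw1]; exact_mod_cast (by omega : ¬ m = mw)
      have hgd : (o.set mw (f mw)).getD m "" = o.getD m "" := by
        simp [List.getD_eq_getElem?_getD, Ne.symm hmm]
      rw [hgd]
      have : (((m : Nat) : Int) ∈ (w :: ws).map (·.1)) ↔ (((m : Nat) : Int) ∈ ws.map (·.1)) := by
        simp [hcast]
      simp only [this]

lemma B_eq_spec (names : List String) : dedupe_names_py_alt names = pvSpec [] names := by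
  unfold dedupe_names_py_alt
  simp only []
  rw [positions_items]
  have hinner : ∀ (o : List String) (it : String × List Int),
      (PySem.List.enumerate it.2).foldl
        (fun out q => PySem.List.pySetD out q.2
          (if q.1 = 0 then it.1 else it.1 ++ "_" ++ PySem.Int.toStr (q.1 + 1))) o
      = (pvWrites it).foldl (fun o q => PySem.List.pySetD o q.1 q.2) o := by
    intro o it
    rw [pvWrites, List.foldl_map]
  simp only [hinner]
  rw [← List.foldl_flatMap]
  set ws := (((PySem.Set.ofList names).map (fun v => (v, pvPos 0 names v))).flatMap pvWrites) with hws
  have hw : ∀ p ∈ ws, ∃ m : Nat, m < names.length ∧ p.1 = (m : Int) ∧ p.2 = pvLbl names m := by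
    intro p hp
    rw [hws] at hp
    rcases List.mem_flatMap.1 hp with ⟨it, hit, hpit⟩
    rcases List.mem_map.1 hit with ⟨v, hv, rfl⟩
    rcases List.mem_map.1 hpit with ⟨q, hq, rfl⟩
    have hq0 : q ∈ PySem.List.enumerate (pvPos (([] : List String).length : Int) names v)
        ((([] : List String).count v : Int)) := by simpa using hq
    rcases pos_mem v names [] q hq0 with ⟨m, hm1, hm2, hm3, hm4⟩
    simp only [List.nil_append, List.length_nil, Nat.zero_add] at hm1 hm3 hm4
    refine ⟨m, by omega, hm2, ?_⟩
    rw [pvLbl, hm3, pvSuffix]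
    by_cases hc : (names.take m).count v = 0
    · simp [hm4, hc]
    · simp [hm4, hc]
  have hcov : ∀ m : Nat, m < names.length → ((m : Nat) : Int) ∈ ws.map (·.1) := by
    intro m hm
    rw [hws]
    apply List.mem_map.2
    have hv : names.getD m "" ∈ names := by
      rw [List.getD_eq_getElem?_getD]
      simp [hm, List.getElem_mem]
    have hidx := pos_cover names m hm
    have hqe : ∃ q ∈ PySem.List.enumerate (pvPos 0 names (names.getD m "")) 0, q.2 = ((m : Nat) : Int) := by
      have := PySem.List.map_snd_enumerate (pvPos 0 names (names.getD m "")) 0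
      rcases List.mem_map.1 (this ▸ hidx) with ⟨q, hq, hq2⟩
      exact ⟨q, hq, hq2⟩
    rcases hqe with ⟨q, hq, hq2⟩
    refine ⟨(q.2, if q.1 = 0 then names.getD m "" else names.getD m "" ++ "_" ++ PySem.Int.toStr (q.1 + 1)), ?_, hq2⟩
    apply List.mem_flatMap.2
    refine ⟨(names.getD m "", pvPos 0 names (names.getD m "")),
      List.mem_map.2 ⟨names.getD m "", (PySem.Set.mem_ofList _ _).2 hv, rfl⟩, ?_⟩
    exact List.mem_map.2 ⟨q, hq, rfl⟩
  have hsc := scatter_getElem names.length (pvLbl names) ws hw (List.replicate names.length "") (by simp)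
  rw [pvSpec_eq_map]
  apply List.ext_getElem
  · rcases names with _ | ⟨x, t⟩
    · simp [hws, pvPos, PySem.List.enumerate_nil]
    · exact (hsc 0 (by simp)).1.trans (by simp)
  · intro m h1 h2
    have hm : m < names.length := by simpa using h2
    have := (hsc m hm).2
    rw [if_pos (hcov m hm)] at this
    rw [← List.getD_eq_getElem _ "" , this]
    simp [pvLbl]

-- ===== VERDICT (by name: the statement is the Claim_ definition above) =====
theorem dedupe_names_py_spec : Claim_equal_dedupe_names_py := by
  intro names _
  unfold Spec_dedupe_names_py
  rw [A_eq_spec, B_eq_spec]
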